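-- pv_equiv track=rewrite | github.com/yanncauchepin/NaturalLanguageProcessing | classifier_hotel.py | prepare_corpus
-- ===== SOURCE A (Python) =====
-- def prepare_corpus(corpus, word_to_idx):
--     sequences = []
--     for line in corpus:
--         tokens = line
--         for i in range(1, len(tokens)):
--             i_gram_sequence = tokens[:i+1]
--             i_gram_sequence_ids = []
--             for j, token in enumerate(i_gram_sequence):
--                 i_gram_sequence_ids.append(word_to_idx[token])
--             sequences.append(i_gram_sequence_ids)
--     return sequences
-- ===== SOURCE B (Python) =====
-- def prepare_corpus(corpus, word_to_idx):
--     sequences = []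
--     for tokens in corpus:
--         if len(tokens) < 2:
--             continue
--         ids = [word_to_idx[t] for t in tokens]
--         for i in range(1, len(tokens)):
--             sequences.append(ids[:i+1])
--     return sequences
-- ===== Notes on version B (the rewrite author's own statement) =====
-- stated objective: simpler
-- what changed: B converts each line to ids once and emits prefixes as slices of that id table, instead of A re-looking-up every token of every prefix; lines shorter than 2 tokens are skipped up front so no lone token is ever looked up.
import Mathlib
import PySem

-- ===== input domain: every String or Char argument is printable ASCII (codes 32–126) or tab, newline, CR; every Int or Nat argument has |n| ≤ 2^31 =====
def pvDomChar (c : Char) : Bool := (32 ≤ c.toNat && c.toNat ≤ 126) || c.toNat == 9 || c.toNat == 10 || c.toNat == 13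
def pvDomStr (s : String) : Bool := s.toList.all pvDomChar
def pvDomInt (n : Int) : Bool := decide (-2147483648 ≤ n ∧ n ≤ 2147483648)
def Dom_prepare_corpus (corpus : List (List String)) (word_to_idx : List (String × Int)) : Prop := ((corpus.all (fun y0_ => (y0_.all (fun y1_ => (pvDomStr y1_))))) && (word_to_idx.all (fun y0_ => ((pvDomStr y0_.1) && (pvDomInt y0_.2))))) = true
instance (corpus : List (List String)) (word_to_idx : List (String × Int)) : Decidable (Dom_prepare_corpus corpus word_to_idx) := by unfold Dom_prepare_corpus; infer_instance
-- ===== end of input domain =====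

-- B converts each line to ids once and takes prefixes of that table instead of A's
-- per-prefix re-lookup of every token (objective: simpler).

-- dict lookup word_to_idx[t]: first matching key; default used only outside Pre_
def pvLook (word_to_idx : List (String × Int)) (t : String) : Int :=
  ((word_to_idx.find? (fun p => p.1 == t)).map Prod.snd).getD 0

-- ===== PORT A =====
def prepare_corpus (corpus : List (List String)) (word_to_idx : List (String × Int)) : List (List Int) :=
  corpus.foldl (fun sequences line =>
    let tokens := line
    (PySem.List.pyRange 1 tokens.length 1).foldl (fun seqs i =>
      let i_gram_sequence := PySem.List.slice tokens none (some (i + 1))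
      let i_gram_sequence_ids :=
        (PySem.List.enumerate i_gram_sequence).foldl
          (fun acc jt => acc ++ [pvLook word_to_idx jt.2]) []
      seqs ++ [i_gram_sequence_ids]) sequences) []

-- ===== PORT B =====
def prepare_corpus_alt (corpus : List (List String)) (word_to_idx : List (String × Int)) : List (List Int) :=
  corpus.foldl (fun sequences tokens =>
    if tokens.length < 2 then sequences
    else
      let ids := tokens.map (pvLook word_to_idx)
      (PySem.List.pyRange 1 tokens.length 1).foldl (fun seqs i =>
        seqs ++ [PySem.List.slice ids none (some (i + 1))]) sequences) []

-- ===== PRECONDITION & SPEC =====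
-- Pre_ excludes exactly the inputs where A raises KeyError: a line of ≥ 2 tokens
-- containing a token that is not a key of word_to_idx.
def Pre_prepare_corpus (corpus : List (List String)) (word_to_idx : List (String × Int)) : Prop :=
  ∀ line ∈ corpus, 2 ≤ line.length →
    ∀ t ∈ line, (word_to_idx.find? (fun p => p.1 == t)).isSome
instance (corpus : List (List String)) (word_to_idx : List (String × Int)) : Decidable (Pre_prepare_corpus corpus word_to_idx) := by unfold Pre_prepare_corpus; infer_instance

def pvWitness_prepare_corpus : List (List String) × (List (String × Int)) :=
  ([["a", "b"], ["c"]], [("a", 1), ("b", 2)])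

def Spec_prepare_corpus (corpus : List (List String)) (word_to_idx : List (String × Int)) (out : List (List Int)) : Prop := out = prepare_corpus_alt corpus word_to_idx
instance (corpus : List (List String)) (word_to_idx : List (String × Int)) (out : List (List Int)) : Decidable (Spec_prepare_corpus corpus word_to_idx out) := by unfold Spec_prepare_corpus; infer_instance

-- ===== CLAIM (what is proved, stated in full; the proofs are below) =====
def Claim_equal_prepare_corpus : Prop := ∀ (corpus : List (List String)) (word_to_idx : List (String × Int)), Dom_prepare_corpus corpus word_to_idx → Pre_prepare_corpus corpus word_to_idx → Spec_prepare_corpus corpus word_to_idx (prepare_corpus corpus word_to_idx)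

-- ===== LEMMAS AND PROOFS =====

-- A's inner per-prefix lookup loop is the mapped lookup of the prefix
theorem pvIds_eq (w : List (String × Int)) (l : List String) :
    (PySem.List.enumerate l).foldl (fun acc jt => acc ++ [pvLook w jt.2]) []
      = l.map (pvLook w) := by
  rw [PySem.List.foldl_append_singleton_eq_map]
  rw [show (fun jt : Int × String => pvLook w jt.2) = (pvLook w) ∘ Prod.snd from rfl]
  rw [← List.map_map, PySem.List.map_snd_enumerate]
  simp

-- per-line agreement of the two inner loops, with any accumulator
theorem pvLine_eq (w : List (String × Int)) (tokens : List String) (S : List (List Int)) :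
    (PySem.List.pyRange 1 tokens.length 1).foldl (fun seqs i =>
      seqs ++ [(PySem.List.enumerate (PySem.List.slice tokens none (some (i + 1)))).foldl
        (fun acc jt => acc ++ [pvLook w jt.2]) []]) S
    = (if tokens.length < 2 then S
       else (PySem.List.pyRange 1 tokens.length 1).foldl (fun seqs i =>
         seqs ++ [PySem.List.slice (tokens.map (pvLook w)) none (some (i + 1))]) S) := by
  by_cases h : tokens.length < 2
  · have hnil : PySem.List.pyRange 1 (tokens.length) 1 = [] :=
      PySem.List.pyRange_one_eq_nil (by exact_mod_cast Nat.lt_succ_iff.mp h)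
    simp [h, hnil]
  · simp only [h, if_false]
    apply PySem.List.foldl_congr_mem
    intro seqs i hi
    have h1 : (1 : Int) ≤ i := (PySem.List.mem_pyRange_one.mp hi).1
    rw [pvIds_eq, PySem.List.slice_to _ (by omega), PySem.List.slice_to _ (by omega),
      List.map_take]

-- ===== VERDICT (by name: the statement is the Claim_ definition above) =====
theorem prepare_corpus_spec : Claim_equal_prepare_corpus := by
  intro corpus w hD hP
  clear hD hP
  unfold Spec_prepare_corpus prepare_corpus prepare_corpus_alt
  induction corpus using List.reverseRecOn with
  | nil => rfl
  | append_singleton xs x ih =>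
      rw [List.foldl_append, List.foldl_append, ih]
      simp only [List.foldl_cons, List.foldl_nil]
      exact pvLine_eq w x _
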